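-- pv_equiv track=rewrite | github.com/tkhren/dotfiles | .python3/useq.py | ncycles
-- ===== SOURCE A (Python) =====
-- def ncycles(iterable, n):
--     """
--         Return items of the iterable n times
--     """
--     saved = []
--     for element in iterable:
--         yield element
--         saved.append(element)
--
--     if saved:
--         for i in range(n):
--             for element in saved:
--                 yield element
-- ===== SOURCE B (Python) =====
-- def ncycles(iterable, n):
--     """
--         Return items of the iterable n times
--     """
--     saved = list(iterable)
--     size = len(saved)
--     total = (max(n, 0) + 1) * size
--     for i in range(total):
--         yield saved[i % size]
-- ===== Notes on version B (the rewrite author's own statement) =====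
-- stated objective: alternative
-- what changed: B computes the total output length (max(n,0)+1)*len(saved) and emits elements by a single flat index loop with modular indexing saved[i % size], replacing A's interleaved yield-and-save pass plus nested repeat loops.
import Mathlib
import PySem

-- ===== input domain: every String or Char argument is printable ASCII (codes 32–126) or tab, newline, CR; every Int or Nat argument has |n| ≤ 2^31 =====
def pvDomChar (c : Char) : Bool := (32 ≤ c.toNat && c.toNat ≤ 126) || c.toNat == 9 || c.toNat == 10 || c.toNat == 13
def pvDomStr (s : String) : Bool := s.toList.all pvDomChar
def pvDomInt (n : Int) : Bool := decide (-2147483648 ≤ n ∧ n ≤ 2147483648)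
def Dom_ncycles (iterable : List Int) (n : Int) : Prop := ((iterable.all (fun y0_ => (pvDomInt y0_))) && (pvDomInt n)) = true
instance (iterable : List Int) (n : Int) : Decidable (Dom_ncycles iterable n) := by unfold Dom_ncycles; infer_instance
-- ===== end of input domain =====

-- B replaces A's interleaved yield-and-save pass plus nested repeat loops by one flat index loop
-- of length (max(n,0)+1)*len(saved) selecting elements by modular indexing (objective: alternative).

-- ===== PORT A =====
-- first loop: yields each element and appends it to saved (state = (output, saved))
def ncycles (iterable : List Int) (n : Int) : List Int :=
  let p := iterable.foldl (fun (p : List Int × List Int) e => (p.1 ++ [e], p.2 ++ [e])) ([], [])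
  let out := p.1
  let saved := p.2
  if saved ≠ [] then
    (PySem.List.pyRange 0 n 1).foldl (fun acc1 _ =>
      saved.foldl (fun acc2 e => acc2 ++ [e]) acc1) out
  else
    out

-- ===== PORT B =====
-- saved[i % size]: i % size is always in range when the loop body runs (size > 0 there),
-- so pyGetD with default 0 is exact.
def ncycles_alt (iterable : List Int) (n : Int) : List Int :=
  let saved := iterable
  let size : Int := saved.length
  let total : Int := (max n 0 + 1) * size
  (PySem.List.pyRange 0 total 1).foldl
    (fun acc i => acc ++ [PySem.List.pyGetD saved (PySem.Int.mod i size) 0]) []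

-- ===== PRECONDITION & SPEC =====
def Spec_ncycles (iterable : List Int) (n : Int) (out : List Int) : Prop := out = ncycles_alt iterable n
instance (iterable : List Int) (n : Int) (out : List Int) : Decidable (Spec_ncycles iterable n out) := by unfold Spec_ncycles; infer_instance

-- ===== CLAIM =====
def Claim_equal_ncycles : Prop := ∀ (iterable : List Int) (n : Int), Dom_ncycles iterable n → Spec_ncycles iterable n (ncycles iterable n)

-- ===== LEMMAS AND PROOFS =====

theorem foldl_pair_append (xs a b : List Int) :
    xs.foldl (fun (p : List Int × List Int) e => (p.1 ++ [e], p.2 ++ [e])) (a, b)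
      = (a ++ xs, b ++ xs) := by
  induction xs generalizing a b with
  | nil => simp
  | cons x xs ih => simp [List.foldl, ih]

theorem foldl_append_singleton (xs acc : List Int) :
    xs.foldl (fun acc2 e => acc2 ++ [e]) acc = acc ++ xs := by
  induction xs generalizing acc with
  | nil => simp
  | cons x xs ih => simp [List.foldl, ih]

theorem foldl_const_append {α : Type} (l : List α) (s init : List Int) :
    l.foldl (fun acc _ => acc ++ s) init = init ++ (List.replicate l.length s).flatten := by
  induction l generalizing init with
  | nil => simp
  | cons x t ih => simp [List.foldl, ih, List.replicate_succ]

theorem foldl_append_singleton_f {α : Type} (l : List α) (f : α → Int) (init : List Int) :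
    l.foldl (fun acc i => acc ++ [f i]) init = init ++ l.map f := by
  induction l generalizing init with
  | nil => simp
  | cons x t ih => simp [List.foldl, ih]

theorem map_getD_range (xs : List Int) :
    (List.range xs.length).map (fun k => xs.getD k 0) = xs := by
  apply List.ext_getElem
  · simp
  · intro i h1 h2
    simp [List.getD_eq_getElem?_getD, h2]

-- flat modular indexing over m*len equals m concatenated copies
theorem range_mod_flatten (xs : List Int) (m : Nat) :
    (List.range (m * xs.length)).map (fun k => xs.getD (k % xs.length) 0)
      = (List.replicate m xs).flatten := by
  induction m with
  | zero => simp
  | succ m ih =>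
    have h : (m + 1) * xs.length = m * xs.length + xs.length := by ring
    rw [h, List.range_add, List.map_append, ih, List.map_map]
    have h2 : (List.range xs.length).map (fun k => xs.getD ((m * xs.length + k) % xs.length) 0)
        = (List.range xs.length).map (fun k => xs.getD k 0) := by
      apply List.map_congr_left
      intro k hk
      rw [List.mem_range] at hk
      have : (m * xs.length + k) % xs.length = k := by
        rw [Nat.add_comm, Nat.add_mul_mod_self_right, Nat.mod_eq_of_lt hk]
      rw [this]
    have h3 : ((fun k => xs.getD (k % xs.length) 0) ∘ (fun a => m * xs.length + a))
        = fun k => xs.getD ((m * xs.length + k) % xs.length) 0 := rfl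
    rw [h3, h2, map_getD_range, List.replicate_succ, List.flatten_cons]
    rw [← List.flatten_concat, ← List.replicate_succ']
    simp [List.replicate_succ]

theorem ncycles_alt_eq (iterable : List Int) (n : Int) :
    ncycles_alt iterable n
      = (List.replicate ((max n 0 + 1).toNat) iterable).flatten := by
  unfold ncycles_alt
  dsimp only
  have hm : ((max n 0 + 1) * (iterable.length : Int))
      = (((max n 0 + 1).toNat * iterable.length : Nat) : Int) := by
    push_cast
    rw [Int.toNat_of_nonneg (by omega)]
  rw [hm, PySem.List.pyRange_zero_nat, foldl_append_singleton_f, List.nil_append,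
    List.map_map]
  have : ((fun i => PySem.List.pyGetD iterable (PySem.Int.mod i (iterable.length : Int)) 0)
      ∘ (fun k : Nat => (k : Int)))
      = fun k : Nat => iterable.getD (k % iterable.length) 0 := by
    funext k
    simp only [Function.comp_apply]
    rw [PySem.Int.mod_natCast, PySem.List.pyGetD_natCast]
  rw [this, range_mod_flatten]

theorem ncycles_spec : Claim_equal_ncycles := by
  intro iterable n _
  unfold Spec_ncycles
  rw [ncycles_alt_eq]
  unfold ncycles
  simp only [foldl_pair_append, List.nil_append, foldl_append_singleton,
    foldl_const_append, PySem.List.length_pyRange_one]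
  rcases iterable with _ | ⟨x, t⟩
  · simp
  · have h1 : (max n 0 + 1).toNat = (n - 0).toNat + 1 := by omega
    simp [h1, List.replicate_succ]
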